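-- pv_equiv track=rewrite | github.com/Costadoat/Informatique | TP/TP12 Dictionnaires/TPanagrammes-M-Péchaud/corranagrammes.py | soustrait
-- ===== SOURCE A (Python) =====
-- def soustrait(mot1 : str, mot2 : str) -> str:
--     '''si mot1 est un sous-mot de mot2 et que ces mots sont triés, enlève de
--     mot2 les lettres de mot1 (avec leur nombre d'occurrences)'''
--     r = ''
--     i1 = 0
--     i2 = 0
--     while i1 < len(mot1):
--         while i2 < len(mot2) and mot1[i1] != mot2[i2]:
--             r = r + mot2[i2] #cplx
--             i2 = i2 + 1
--         i1 = i1 + 1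
--         i2 = i2 + 1
--     return r + mot2[i2:]
-- ===== SOURCE B (Python) =====
-- def soustrait(mot1: str, mot2: str) -> str:
--     # Text-driven single pass: walk mot2 once, consuming mot1's characters
--     # greedily with one index j; unmatched characters of mot2 are kept.
--     res = []
--     j = 0
--     for c in mot2:
--         if j < len(mot1) and c == mot1[j]:
--             j += 1
--         else:
--             res.append(c)
--     return ''.join(res)
-- ===== Notes on version B (the rewrite author's own statement) =====
-- stated objective: simpler
-- what changed: A's pattern-driven nested while loops (outer over mot1, inner scanning mot2 for each pattern char) with quadratic 'r = r + c' string building are replaced by a single text-driven pass over mot2 with one pattern index, accumulating kept characters in a list joined once.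
import Mathlib
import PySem

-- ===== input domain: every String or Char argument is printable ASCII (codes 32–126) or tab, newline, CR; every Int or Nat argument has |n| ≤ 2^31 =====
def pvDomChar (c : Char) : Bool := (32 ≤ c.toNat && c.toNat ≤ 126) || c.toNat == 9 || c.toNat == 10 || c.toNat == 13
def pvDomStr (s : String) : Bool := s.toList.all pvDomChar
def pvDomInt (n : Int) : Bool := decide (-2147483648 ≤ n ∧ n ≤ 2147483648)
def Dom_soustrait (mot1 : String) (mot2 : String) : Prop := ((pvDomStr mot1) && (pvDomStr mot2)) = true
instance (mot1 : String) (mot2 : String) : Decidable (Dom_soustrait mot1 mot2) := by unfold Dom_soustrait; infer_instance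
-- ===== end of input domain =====

-- B replaces A's pattern-driven nested while loops by a single text-driven pass
-- over mot2 with one pattern index (objective: simpler); same return value.

-- ===== PORT A =====
-- inner while loop of A: copy mot2's chars to r until mot1[i1] is found (or mot2 ends)
def soustraitInner (l2 : List Char) (c : Char) (i2 : Nat) (r : List Char) : List Char × Nat :=
  if h : i2 < l2.length then
    if l2[i2] ≠ c then soustraitInner l2 c (i2 + 1) (r ++ [l2[i2]])
    else (r, i2)
  else (r, i2)
termination_by l2.length - i2

-- outer while loop of A over i1
def soustraitOuter (l1 l2 : List Char) (i1 i2 : Nat) (r : List Char) : List Char :=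
  if h : i1 < l1.length then
    let p := soustraitInner l2 l1[i1] i2 r
    soustraitOuter l1 l2 (i1 + 1) (p.2 + 1) p.1
  else r ++ l2.drop i2        -- r + mot2[i2:]
termination_by l1.length - i1

def soustrait (mot1 : String) (mot2 : String) : String :=
  String.mk (soustraitOuter mot1.toList mot2.toList 0 0 [])

-- ===== PORT B =====
def soustrait_alt (mot1 : String) (mot2 : String) : String :=
  String.mk
    (mot2.toList.foldl
      (fun (st : Nat × List Char) c =>
        if h : st.1 < mot1.toList.length then
          if c = mot1.toList[st.1] then (st.1 + 1, st.2) else (st.1, st.2 ++ [c])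
        else (st.1, st.2 ++ [c]))
      (0, [])).2

-- ===== PRECONDITION & SPEC =====
def Spec_soustrait (mot1 : String) (mot2 : String) (out : String) : Prop := out = soustrait_alt mot1 mot2
instance (mot1 : String) (mot2 : String) (out : String) : Decidable (Spec_soustrait mot1 mot2 out) := by unfold Spec_soustrait; infer_instance

-- ===== CLAIM (what is proved, stated in full; the proofs are below) =====
def Claim_equal_soustrait : Prop := ∀ (mot1 : String) (mot2 : String), Dom_soustrait mot1 mot2 → Spec_soustrait mot1 mot2 (soustrait mot1 mot2)

-- ===== LEMMAS AND PROOFS =====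

-- common characterisation: greedy removal of xs as a subsequence prefix from ys
def greedySub : List Char → List Char → List Char
  | [], ys => ys
  | _ :: _, [] => []
  | x :: xs, y :: ys => if y = x then greedySub xs ys else y :: greedySub (x :: xs) ys

theorem greedySub_nil_right (xs : List Char) : greedySub xs [] = [] := by
  cases xs <;> simp [greedySub]

-- B's fold computes greedySub
theorem foldB_eq (l1 : List Char) (ys : List Char) (j : Nat) (acc : List Char) :
    (ys.foldl
      (fun (st : Nat × List Char) c =>
        if h : st.1 < l1.length then
          if c = l1[st.1] then (st.1 + 1, st.2) else (st.1, st.2 ++ [c])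
        else (st.1, st.2 ++ [c]))
      (j, acc)).2 = acc ++ greedySub (l1.drop j) ys := by
  induction ys generalizing j acc with
  | nil => simp [greedySub_nil_right]
  | cons y ys ih =>
    by_cases h : j < l1.length
    · have hd : l1.drop j = l1[j] :: l1.drop (j + 1) := List.drop_eq_getElem_cons h
      by_cases he : y = l1[j]
      · rw [List.foldl_cons]
        simp only [dif_pos h, if_pos he]
        rw [ih, hd, greedySub, if_pos he]
      · rw [List.foldl_cons]
        simp only [dif_pos h, if_neg he]
        rw [ih, hd, greedySub, if_neg he]
        simp
    · have hd : l1.drop j = [] := List.drop_eq_nil_of_le (le_of_not_gt h)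
      rw [List.foldl_cons]
      simp only [dif_neg h]
      rw [ih, hd]
      simp [greedySub]

-- A's inner loop: takeWhile / length of takeWhile
theorem inner_eq (l2 : List Char) (c : Char) (i2 : Nat) (r : List Char) :
    soustraitInner l2 c i2 r =
      (r ++ (l2.drop i2).takeWhile (· ≠ c),
       i2 + ((l2.drop i2).takeWhile (· ≠ c)).length) := by
  fun_induction soustraitInner l2 c i2 r with
  | case1 i2 r h hne ih =>
    have hd : l2.drop i2 = l2[i2] :: l2.drop (i2 + 1) := List.drop_eq_getElem_cons h
    rw [ih, hd, List.takeWhile_cons]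
    simp only [Prod.mk.injEq]
    constructor
    · simp [hne]
    · simp [hne]
      omega
  | case2 i2 r h hne =>
    have hd : l2.drop i2 = l2[i2] :: l2.drop (i2 + 1) := List.drop_eq_getElem_cons h
    simp at hne
    rw [hd, List.takeWhile_cons]
    simp [hne]
  | case3 i2 r h =>
    have hd : l2.drop i2 = [] := List.drop_eq_nil_of_le (le_of_not_gt h)
    simp [hd]

-- greedySub in takeWhile/dropWhile form
theorem greedySub_cons (x : Char) (xs ys : List Char) :
    greedySub (x :: xs) ys =
      ys.takeWhile (· ≠ x) ++ greedySub xs ((ys.dropWhile (· ≠ x)).drop 1) := by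
  induction ys with
  | nil => simp [greedySub, greedySub_nil_right]
  | cons y ys ih =>
    by_cases he : y = x
    · simp [greedySub, List.takeWhile, List.dropWhile, he]
    · simp [greedySub, List.takeWhile, List.dropWhile, he, ih]

theorem drop_length_takeWhile (p : Char → Bool) (l : List Char) :
    l.drop (l.takeWhile p).length = l.dropWhile p := by
  induction l with
  | nil => simp
  | cons a l ih =>
    by_cases h : p a <;> simp [h, ih]

-- A's outer loop computes greedySub
theorem outer_eq (l1 l2 : List Char) (i1 i2 : Nat) (r : List Char) :
    soustraitOuter l1 l2 i1 i2 r = r ++ greedySub (l1.drop i1) (l2.drop i2) := by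
  fun_induction soustraitOuter l1 l2 i1 i2 r with
  | case1 i1 i2 r h p ih =>
    have hd1 : l1.drop i1 = l1[i1] :: l1.drop (i1 + 1) := List.drop_eq_getElem_cons h
    simp only [p, inner_eq] at ih ⊢
    rw [ih]
    have hsplit : (l2.drop i2).takeWhile (· ≠ l1[i1]) ++ (l2.drop i2).dropWhile (· ≠ l1[i1]) = l2.drop i2 :=
      List.takeWhile_append_dropWhile
    have hdrop : l2.drop (i2 + ((l2.drop i2).takeWhile (· ≠ l1[i1])).length + 1) =
        ((l2.drop i2).dropWhile (· ≠ l1[i1])).drop 1 := by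
      have h1 : ((l2.drop i2).drop ((l2.drop i2).takeWhile (· ≠ l1[i1])).length).drop 1 =
          ((l2.drop i2).dropWhile (· ≠ l1[i1])).drop 1 := by
        rw [drop_length_takeWhile]
      rw [List.drop_drop, List.drop_drop] at h1
      rw [← h1]
      congr 1
      try omega
    rw [hdrop, hd1, greedySub_cons]
    simp
  | case2 i1 i2 r h =>
    have hd : l1.drop i1 = [] := List.drop_eq_nil_of_le (le_of_not_gt h)
    simp [hd, greedySub]

-- ===== VERDICT (by name: the statement is the Claim_ definition above) =====
theorem soustrait_spec : Claim_equal_soustrait := by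
  intro mot1 mot2 _
  unfold Spec_soustrait soustrait soustrait_alt
  rw [outer_eq, foldB_eq]
  simp
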